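-- pv_equiv track=rewrite | github.com/guillp/adventofcode | aoc2015/01.py | solve
-- ===== SOURCE A (Python) =====
-- from collections.abc import Iterator
--
-- def solve(content: str) -> Iterator[int]:
--     yield content.count("(") - content.count(")")
--
--     f = 0
--     for i, c in enumerate(content):
--         if c == "(":
--             f += 1
--         elif c == ")":
--             f -= 1
--         if f < 0:
--             yield i + 1
--             return
-- ===== SOURCE B (Python) =====
-- from collections.abc import Iterator
--
--
-- def solve(content: str) -> Iterator[int]:
--     # One parenthesis-matching pass: a stack of '(' indices and the list of
--     # unmatched ')' indices.  Matched pairs cancel, so the total floor is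
--     # len(stack) - len(unmatched); the basement is first entered right after
--     # the first unmatched ')'.
--     stack = []
--     unmatched = []
--     for i, c in enumerate(content):
--         if c == "(":
--             stack.append(i)
--         elif c == ")":
--             if stack:
--                 stack.pop()
--             else:
--                 unmatched.append(i)
--     yield len(stack) - len(unmatched)
--     if unmatched:
--         yield unmatched[0] + 1
-- ===== Notes on version B (the rewrite author's own statement) =====
-- stated objective: alternative
-- what changed: B replaces A's substring counts plus running-floor early-return loop by a single parenthesis-matching pass maintaining a stack of '(' indices and a list of unmatched ')' indices: the total floor is len(stack)-len(unmatched) and the basement position is the first unmatched ')' index plus one.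
import Mathlib
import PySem

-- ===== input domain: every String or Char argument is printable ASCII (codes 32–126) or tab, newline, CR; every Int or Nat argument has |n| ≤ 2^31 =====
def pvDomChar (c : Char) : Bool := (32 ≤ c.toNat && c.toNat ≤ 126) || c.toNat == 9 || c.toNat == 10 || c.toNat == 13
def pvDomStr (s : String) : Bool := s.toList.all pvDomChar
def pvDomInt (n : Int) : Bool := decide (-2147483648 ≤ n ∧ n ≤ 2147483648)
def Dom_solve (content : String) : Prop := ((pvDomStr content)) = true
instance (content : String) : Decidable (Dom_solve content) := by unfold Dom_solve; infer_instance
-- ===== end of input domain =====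

-- B replaces A's counts + running-floor early-return loop by one parenthesis-matching pass
-- (stack of '(' indices, list of unmatched ')' indices); same cost, different algorithm/state.


-- ===== PORT A =====
-- A's for-loop: running floor f, index i; yields i+1 at the first f < 0, else nothing
def solveLoopA : List Char → Int → Int → Option Int
  | [], _, _ => none
  | c :: rest, i, f =>
    let f' := if c = '(' then f + 1 else if c = ')' then f - 1 else f
    if f' < 0 then some (i + 1) else solveLoopA rest (i + 1) f'

def solve (content : String) : List Int :=
  let first : Int := (PySem.Str.count content "(" : Int) - (PySem.Str.count content ")" : Int)
  match solveLoopA content.toList 0 0 with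
  | none => [first]
  | some p => [first, p]

-- ===== PORT B =====
-- B's matching pass: stack of '(' indices (push = append at end, pop = dropLast),
-- unmatched ')' indices appended in order
def solveLoopB : List Char → Int → List Int → List Int → List Int × List Int
  | [], _, st, un => (st, un)
  | c :: rest, i, st, un =>
    if c = '(' then solveLoopB rest (i + 1) (st ++ [i]) un
    else if c = ')' then
      if st = [] then solveLoopB rest (i + 1) st (un ++ [i])
      else solveLoopB rest (i + 1) st.dropLast un
    else solveLoopB rest (i + 1) st un

def solve_alt (content : String) : List Int :=
  let r := solveLoopB content.toList 0 [] []
  let total : Int := (r.1.length : Int) - (r.2.length : Int)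
  match r.2.head? with
  | none => [total]
  | some j => [total, j + 1]

-- ===== PRECONDITION & SPEC =====
def Spec_solve (content : String) (out : List Int) : Prop := out = solve_alt content
instance (content : String) (out : List Int) : Decidable (Spec_solve content out) := by unfold Spec_solve; infer_instance

-- ===== CLAIM (what is proved, stated in full; the proofs are below) =====
def Claim_equal_solve : Prop := ∀ (content : String), Dom_solve content → Spec_solve content (solve content)

-- ===== LEMMAS AND PROOFS =====

-- Chars.count for a single-character needle is List.count
lemma chars_count_go_singleton (v : Char) : ∀ (t : List Char) (fuel acc : Nat),
    t.length ≤ fuel → PySem.Chars.count.go [v] fuel t acc = acc + t.count v := by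
  intro t
  induction t with
  | nil => intro fuel acc _; cases fuel <;> simp [PySem.Chars.count.go]
  | cons c t ih =>
    intro fuel acc h
    cases fuel with
    | zero => simp at h
    | succ n =>
      simp only [List.length_cons, Nat.succ_le_succ_iff] at h
      by_cases hc : v = c
      · subst hc
        simp [PySem.Chars.count.go, List.isPrefixOf, ih _ _ h]
        omega
      · have : [v].isPrefixOf (c :: t) = false := by
          simp [List.isPrefixOf]; exact fun h' => hc h'
        simp [PySem.Chars.count.go, this, List.count_cons, ih _ _ h]
        intro h'; exact absurd h'.symm hc

lemma chars_count_singleton (cs : List Char) (v : Char) :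
    PySem.Chars.count cs [v] = cs.count v := by
  simp [PySem.Chars.count, chars_count_go_singleton v cs cs.length 0 le_rfl]

-- stack length − unmatched length evolves exactly like the floor delta
lemma loopB_total (cs : List Char) : ∀ (i : Int) (st un : List Int),
    ((solveLoopB cs i st un).1.length : Int) - ((solveLoopB cs i st un).2.length : Int)
      = (st.length : Int) - (un.length : Int) + ((cs.count '(' : Int) - (cs.count ')' : Int)) := by
  induction cs with
  | nil => intro i st un; simp [solveLoopB]
  | cons c cs ih =>
    intro i st un
    by_cases h1 : c = '('
    · subst h1
      have hstep : solveLoopB ('(' :: cs) i st un = solveLoopB cs (i + 1) (st ++ [i]) un := by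
        simp [solveLoopB]
      rw [hstep, ih]
      simp [List.count_cons]
      omega
    · by_cases h2 : c = ')'
      · subst h2
        by_cases hst : st = []
        · have hstep : solveLoopB (')' :: cs) i st un = solveLoopB cs (i + 1) st (un ++ [i]) := by
            simp [solveLoopB, h1, hst]
          rw [hstep, ih]
          simp [List.count_cons, h1]
          omega
        · have hstep : solveLoopB (')' :: cs) i st un = solveLoopB cs (i + 1) st.dropLast un := by
            simp [solveLoopB, h1, hst]
          have hpos : 1 ≤ st.length := List.length_pos_iff.mpr hst
          rw [hstep, ih]
          simp [List.count_cons, h1, List.length_dropLast]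
          omega
      · have hstep : solveLoopB (c :: cs) i st un = solveLoopB cs (i + 1) st un := by
          simp [solveLoopB, h1, h2]
        rw [hstep, ih]
        simp [h1, h2]

-- once nonempty, the unmatched accumulator keeps its head
lemma loopB_head (cs : List Char) : ∀ (i u0 : Int) (st u : List Int),
    (solveLoopB cs i st (u0 :: u)).2.head? = some u0 := by
  induction cs with
  | nil => intro i u0 st u; simp [solveLoopB]
  | cons c cs ih =>
    intro i u0 st u
    simp only [solveLoopB]
    split_ifs with h1 h2 h3
    · exact ih _ _ _ _
    · have : (u0 :: u) ++ [i] = u0 :: (u ++ [i]) := rfl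
      rw [this]; exact ih _ _ _ _
    · exact ih _ _ _ _
    · exact ih _ _ _ _

-- A's early-return loop = first unmatched ')' of B's matching pass, shifted by one
lemma loopA_eq_loopB (cs : List Char) : ∀ (i : Int) (st : List Int),
    solveLoopA cs i (st.length : Int)
      = ((solveLoopB cs i st []).2.head?).map (fun j => j + 1) := by
  induction cs with
  | nil => intro i st; simp [solveLoopA, solveLoopB]
  | cons c cs ih =>
    intro i st
    by_cases h1 : c = '('
    · subst h1
      have hstepB : solveLoopB ('(' :: cs) i st [] = solveLoopB cs (i + 1) (st ++ [i]) [] := by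
        simp [solveLoopB]
      have hnn : ¬ ((st.length : Int) + 1 < 0) := by omega
      have hstepA : solveLoopA ('(' :: cs) i (st.length : Int)
          = solveLoopA cs (i + 1) ((st.length : Int) + 1) := by
        simp [solveLoopA, hnn]
      have hlen : (st.length : Int) + 1 = ((st ++ [i]).length : Int) := by simp
      rw [hstepA, hstepB, hlen, ih]
    · by_cases h2 : c = ')'
      · subst h2
        by_cases hst : st = []
        · have hneg : ((st.length : Int) - 1 < 0) := by simp [hst]
          have hstepA : solveLoopA (')' :: cs) i (st.length : Int) = some (i + 1) := by
            simp [solveLoopA, h1, hneg]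
          have hstepB : solveLoopB (')' :: cs) i st [] = solveLoopB cs (i + 1) st [i] := by
            simp [solveLoopB, h1, hst]
          rw [hstepA, hstepB, loopB_head]
          rfl
        · have hpos : 1 ≤ st.length := List.length_pos_iff.mpr hst
          have hnn : ¬ ((st.length : Int) - 1 < 0) := by omega
          have hstepA : solveLoopA (')' :: cs) i (st.length : Int)
              = solveLoopA cs (i + 1) ((st.length : Int) - 1) := by
            simp [solveLoopA, h1, hnn]
          have hstepB : solveLoopB (')' :: cs) i st [] = solveLoopB cs (i + 1) st.dropLast [] := by
            simp [solveLoopB, h1, hst]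
          have hlen : (st.length : Int) - 1 = (st.dropLast.length : Int) := by
            simp [List.length_dropLast]; omega
          rw [hstepA, hstepB, hlen, ih]
      · have hnn : ¬ ((st.length : Int) < 0) := by omega
        have hstepA : solveLoopA (c :: cs) i (st.length : Int)
            = solveLoopA cs (i + 1) (st.length : Int) := by
          simp [solveLoopA, h1, h2, hnn]
        have hstepB : solveLoopB (c :: cs) i st [] = solveLoopB cs (i + 1) st [] := by
          simp [solveLoopB, h1, h2]
        rw [hstepA, hstepB, ih]

-- ===== VERDICT (by name: the statement is the Claim_ definition above) =====
theorem solve_spec : Claim_equal_solve := by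
  intro content _
  unfold Spec_solve solve solve_alt
  have h1 : PySem.Str.count content "(" = content.toList.count '(' := by
    rw [PySem.Str.count_eq, show ("(" : String).toList = ['('] from rfl, chars_count_singleton]
  have h2 : PySem.Str.count content ")" = content.toList.count ')' := by
    rw [PySem.Str.count_eq, show (")" : String).toList = [')'] from rfl, chars_count_singleton]
  have htot := loopB_total content.toList 0 [] []
  have hloop := loopA_eq_loopB content.toList 0 []
  simp only [List.length_nil, Nat.cast_zero] at hloop
  simp only [List.length_nil, Nat.cast_zero, sub_zero, zero_add] at htot
  rw [h1, h2, hloop, ← htot]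
  cases hf : (solveLoopB content.toList 0 [] []).2.head? with
  | none => simp [hf]
  | some j => simp [hf]
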